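-- pv_equiv track=rewrite | github.com/yeison20011/php_yeison | FUNDAMENTOS DE PROGRAMACION PYTHON/LISTAS (VECTORES)/ejercicio 88.py | nuevo
-- ===== SOURCE A (Python) =====
-- def nuevo (lista):
--     nueva = []
--     for i in range (len (lista)):
--         nueva.append (0)
--         for j in range (i + 1):
--             if (i % 2 == 0):
--                 nueva [i] += lista [j]
--             else:
--                 nueva [i] += (lista [j] * ((-1)**j))
--     return (nueva)
-- ===== SOURCE B (Python) =====
-- def nuevo(lista):
--     # One pass: maintain the plain prefix sum and the alternating prefix sum,
--     # pick one of them by the parity of the index.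
--     plain = 0
--     alt = 0
--     out = []
--     for i, x in enumerate(lista):
--         plain += x
--         alt += x if i % 2 == 0 else -x
--         out.append(plain if i % 2 == 0 else alt)
--     return out
-- ===== Notes on version B (the rewrite author's own statement) =====
-- stated objective: faster
-- what changed: Replaces the quadratic per-index inner summation loop by a single pass that maintains two running sums (plain and alternating) and picks one by index parity.
import Mathlib
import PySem

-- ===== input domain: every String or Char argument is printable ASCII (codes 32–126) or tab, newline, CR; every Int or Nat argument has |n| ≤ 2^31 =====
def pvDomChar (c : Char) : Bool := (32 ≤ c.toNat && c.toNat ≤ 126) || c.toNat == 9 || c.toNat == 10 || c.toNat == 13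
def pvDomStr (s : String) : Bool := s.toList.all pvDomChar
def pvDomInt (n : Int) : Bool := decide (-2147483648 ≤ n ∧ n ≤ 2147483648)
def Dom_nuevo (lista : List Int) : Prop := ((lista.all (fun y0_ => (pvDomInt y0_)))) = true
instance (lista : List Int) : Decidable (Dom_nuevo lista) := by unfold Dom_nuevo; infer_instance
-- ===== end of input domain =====

-- B replaces A's quadratic per-index inner summation by one pass maintaining two
-- running prefix sums (plain and alternating), chosen by index parity (faster).

-- ===== PORT A =====
-- Literal transliteration: outer loop appends 0, inner loop adds lista[j] (or
-- lista[j]*(-1)**j) into nueva[i].  Indices i, j are always in range, so the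
-- in-range accesses lista[j] / nueva[i] are exactly List.getD _ _ 0.
def nuevo (lista : List Int) : List Int :=
  (List.range lista.length).foldl
    (fun nueva i =>
      (List.range (i + 1)).foldl
        (fun nv j =>
          nv.set i (nv.getD i 0 +
            (if i % 2 = 0 then lista.getD j 0 else lista.getD j 0 * (-1) ^ j)))
        (nueva ++ [0]))
    []

-- ===== PORT B =====
-- Transliteration of Source B: one pass with running sums `plain` and `alt`.
def nuevoAltGo (xs : List Int) (i : Nat) (plain alt : Int) : List Int :=
  match xs with
  | [] => []
  | x :: rest =>
    let plain' := plain + x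
    let alt' := alt + (if i % 2 = 0 then x else -x)
    (if i % 2 = 0 then plain' else alt') :: nuevoAltGo rest (i + 1) plain' alt'

def nuevo_alt (lista : List Int) : List Int := nuevoAltGo lista 0 0 0

-- ===== PRECONDITION & SPEC =====
def Spec_nuevo (lista : List Int) (out : List Int) : Prop := out = nuevo_alt lista
instance (lista : List Int) (out : List Int) : Decidable (Spec_nuevo lista out) := by unfold Spec_nuevo; infer_instance

-- ===== CLAIM (what is proved, stated in full; the proofs are below) =====
def Claim_equal_nuevo : Prop := ∀ (lista : List Int), Dom_nuevo lista → Spec_nuevo lista (nuevo lista)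

-- ===== LEMMAS AND PROOFS =====

-- Plain and alternating prefix sums of the first k elements, and the value the
-- function puts at index i.
def sumPlain (l : List Int) (k : Nat) : Int := ((List.range k).map (fun j => l.getD j 0)).sum
def sumAlt (l : List Int) (k : Nat) : Int := ((List.range k).map (fun j => l.getD j 0 * (-1) ^ j)).sum
def specF (l : List Int) (i : Nat) : Int := if i % 2 = 0 then sumPlain l (i + 1) else sumAlt l (i + 1)

theorem sumPlain_succ (l : List Int) (k : Nat) :
    sumPlain l (k + 1) = sumPlain l k + l.getD k 0 := by
  simp [sumPlain, List.range_succ]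

theorem sumAlt_succ (l : List Int) (k : Nat) :
    sumAlt l (k + 1) = sumAlt l k + l.getD k 0 * (-1) ^ k := by
  simp [sumAlt, List.range_succ]

theorem neg_one_pow_of_mod (k : Nat) :
    ((-1 : Int) ^ k) = if k % 2 = 0 then 1 else -1 := by
  rcases Nat.even_or_odd k with h | h
  · simp [h.neg_one_pow, Nat.even_iff.mp h]
  · simp [h.neg_one_pow, Nat.odd_iff.mp h]

-- The inner loop of A adds Σ_{j<n} g j into the freshly appended last slot.
theorem inner_fold (g : Nat → Int) (nueva : List Int) (c : Int) (i : Nat)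
    (hi : nueva.length = i) : ∀ n : Nat,
    (List.range n).foldl (fun nv j => nv.set i (nv.getD i 0 + g j)) (nueva ++ [c])
      = nueva ++ [c + ((List.range n).map g).sum] := by
  subst hi
  intro n
  induction n with
  | zero => simp
  | succ n ih =>
    rw [List.range_succ, List.foldl_append, ih]
    simp [add_assoc]

-- A's outer loop builds the map of specF over range n.
theorem nuevo_fold (lista : List Int) : ∀ n : Nat,
    (List.range n).foldl
      (fun nueva i =>
        (List.range (i + 1)).foldl
          (fun nv j =>
            nv.set i (nv.getD i 0 +
              (if i % 2 = 0 then lista.getD j 0 else lista.getD j 0 * (-1) ^ j)))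
          (nueva ++ [0]))
      []
      = (List.range n).map (specF lista) := by
  intro n
  induction n with
  | zero => simp
  | succ n ih =>
    rw [List.range_succ, List.foldl_append, ih]
    have hlen : ((List.range n).map (specF lista)).length = n := by simp
    simp only [List.foldl_cons, List.foldl_nil, List.map_append, List.map_cons, List.map_nil]
    by_cases h : n % 2 = 0
    · have hin := inner_fold (fun j => lista.getD j 0) ((List.range n).map (specF lista)) 0 n hlen (n + 1)
      simp only [if_pos h]
      rw [hin]
      simp [specF, h, sumPlain]
    · have hin := inner_fold (fun j => lista.getD j 0 * (-1) ^ j) ((List.range n).map (specF lista)) 0 n hlen (n + 1)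
      simp only [if_neg h]
      rw [hin]
      simp [specF, h, sumAlt]

-- B's loop, started at position k with the correct running sums, produces the
-- map of specF over the remaining positions.
theorem nuevoAltGo_eq (l : List Int) : ∀ (xs : List Int) (k : Nat), l.drop k = xs →
    nuevoAltGo xs k (sumPlain l k) (sumAlt l k)
      = (List.range' k xs.length).map (specF l) := by
  intro xs
  induction xs with
  | nil => intro k _; simp [nuevoAltGo]
  | cons x rest ih =>
    intro k h
    have hget : l[k]? = some x := by
      have : (l.drop k)[0]? = some x := by rw [h]; rfl
      simpa using this
    have hx : l.getD k 0 = x := by simp [List.getD, hget]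
    have hdrop : l.drop (k + 1) = rest := by
      have : l.drop (k + 1) = (l.drop k).drop 1 := by
        rw [List.drop_drop]
      rw [this, h]; rfl
    have hplain : sumPlain l k + x = sumPlain l (k + 1) := by
      rw [sumPlain_succ, hx]
    have halt : sumAlt l k + (if k % 2 = 0 then x else -x) = sumAlt l (k + 1) := by
      rw [sumAlt_succ, hx, neg_one_pow_of_mod]
      by_cases h2 : k % 2 = 0 <;> simp [h2]
    show (if k % 2 = 0 then sumPlain l k + x else sumAlt l k + (if k % 2 = 0 then x else -x)) ::
        nuevoAltGo rest (k + 1) (sumPlain l k + x) (sumAlt l k + (if k % 2 = 0 then x else -x))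
      = (List.range' k (rest.length + 1)).map (specF l)
    rw [List.range'_succ, List.map_cons, hplain, halt, ih (k + 1) hdrop]
    by_cases h2 : k % 2 = 0 <;> simp [specF, h2]

-- ===== VERDICT (by name: the statement is the Claim_ definition above) =====
theorem nuevo_spec : Claim_equal_nuevo := by
  intro lista _
  unfold Spec_nuevo nuevo nuevo_alt
  rw [nuevo_fold]
  have h0p : sumPlain lista 0 = 0 := by simp [sumPlain]
  have h0a : sumAlt lista 0 = 0 := by simp [sumAlt]
  have h := nuevoAltGo_eq lista lista 0 (by simp)
  rw [h0p, h0a] at h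
  rw [h, List.range_eq_range']
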